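-- pv_equiv track=rewrite | github.com/NBO2001/UFAM---Atividades | IC/Atividades/Lista_dominor/src/terceira_parte/__init__.py | m_mais_ponto
-- ===== SOURCE A (Python) =====
-- def suma(values):
--     if len(values) == 0:
--         return 0
--
--     return head(values) + suma(tail(values))
--
-- def head(lista_itens):
--     if len(lista_itens) == 0:
--         return []
--     else:
--         return lista_itens[0]
--
-- def tail(lista_itens):
--     if len(lista_itens) == 0:
--         return []
--     else:
--         return lista_itens[1:]
--
-- def sum_pontas(pontas):
--     if len(pontas) == 0:
--         return 0
--     return suma(pontas[0]) + sum_pontas(pontas[1:])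
--
-- def ponta_que_entra(pedra, ponta):
--     if pedra[0] == ponta[0] and pedra[0] != pedra[1]:
--         return [pedra[1]]
--     elif pedra[0] == ponta[0] and pedra[0] == pedra[1]:
--         return [pedra[0], pedra[1]]
--     else:
--         return [pedra[0]]
--
-- def find_indexs(lado_a, mesa):
--     indece = []
--     for ind in range(0, len(mesa)):
--         if len(mesa[ind]) != 0 and lado_a == mesa[ind][0]:
--             indece.append(ind)
--
--     return indece
--
-- def joga_pedra(pedra, mesa, index):
--
--     valores_anteriores = mesa[:index]
--     if len(mesa) != index + 1:
--         valores_posteriores = mesa[(index + 1) :]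
--     else:
--         valores_posteriores = ()
--
--     return (
--         valores_anteriores
--         + (ponta_que_entra(pedra, mesa[index]),)
--         + valores_posteriores
--     )
--
-- def m_mais_ponto(pedra, mesa):
--
--     indexs = find_indexs(pedra[0], mesa) + find_indexs(pedra[1], mesa)
--
--     maior_ponto = 0
--     maior_ponto_index = 0
--
--     for inx in indexs:
--         if maior_ponto <= sum_pontas(joga_pedra(pedra, mesa, inx)):
--             maior_ponto = sum_pontas(joga_pedra(pedra, mesa, inx))
--             maior_ponto_index = inx
--
--     return (maior_ponto, maior_ponto_index)
-- ===== SOURCE B (Python) =====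
-- def m_mais_ponto(pedra, mesa):
--     # One pass: precompute total pip-sum and per-row sums once, then score each
--     # candidate by a delta of the replaced row instead of re-summing the table.
--     a, b = pedra[0], pedra[1]
--     total = 0
--     row_sums = []
--     for row in mesa:
--         s = sum(row)
--         row_sums.append(s)
--         total += s
--     best, best_i = 0, 0
--     for side in (a, b):
--         for i, row in enumerate(mesa):
--             if row and row[0] == side:
--                 if row[0] == a:
--                     new = b if a != b else a + b
--                 else:
--                     new = a
--                 val = total - row_sums[i] + new
--                 if best <= val:
--                     best, best_i = val, i
--     return (best, best_i)
-- ===== Notes on version B (the rewrite author's own statement) =====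
-- stated objective: faster
-- what changed: B precomputes the table's total pip-sum and per-row sums in one pass and scores each candidate index by a delta for the replaced row, instead of A's rebuilding of the whole table and recursive re-summing of it twice per candidate index.
import Mathlib
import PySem

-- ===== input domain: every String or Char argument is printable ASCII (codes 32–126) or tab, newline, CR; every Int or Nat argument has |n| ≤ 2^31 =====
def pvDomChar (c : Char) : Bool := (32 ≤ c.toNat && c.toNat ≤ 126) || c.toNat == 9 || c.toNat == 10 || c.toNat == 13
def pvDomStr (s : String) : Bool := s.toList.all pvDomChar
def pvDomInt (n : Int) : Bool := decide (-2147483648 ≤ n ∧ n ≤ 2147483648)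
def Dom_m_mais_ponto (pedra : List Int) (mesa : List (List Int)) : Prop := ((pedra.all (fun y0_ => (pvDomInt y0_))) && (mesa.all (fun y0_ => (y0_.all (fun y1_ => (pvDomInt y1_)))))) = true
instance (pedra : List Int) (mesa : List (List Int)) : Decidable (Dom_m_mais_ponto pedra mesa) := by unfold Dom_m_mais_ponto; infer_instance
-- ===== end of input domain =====

-- B precomputes the total pip-sum and per-row sums once and scores each candidate
-- index by a delta of the replaced row, instead of rebuilding and re-summing the
-- whole table per candidate (objective: faster).


-- ===== PORT A =====
-- suma(values): head/tail recursion over the list (Python's head/tail empty cases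
-- are the recursion's base case, reached exactly when values == []).
def suma : List Int → Int
  | [] => 0
  | x :: xs => x + suma xs

def sum_pontas : List (List Int) → Int
  | [] => 0
  | p :: ps => suma p + sum_pontas ps

-- pedra[0], pedra[1], ponta[0]: in range on every call under Pre_ (len(pedra) ≥ 2;
-- ponta is a nonempty row selected by find_indexs), so pyGetD is exact here.
def ponta_que_entra (pedra : List Int) (ponta : List Int) : List Int :=
  let p0 := PySem.List.pyGetD pedra 0 0
  let p1 := PySem.List.pyGetD pedra 1 0
  let t0 := PySem.List.pyGetD ponta 0 0
  if p0 = t0 ∧ p0 ≠ p1 then [p1]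
  else if p0 = t0 ∧ p0 = p1 then [p0, p1]
  else [p0]

-- 'for ind in range(0, len(mesa)): … mesa[ind] …' transcribed as structural
-- recursion over mesa carrying ind: same rows in the same order with the same index.
def find_indexs_go (lado_a : Int) : List (List Int) → Int → List Int
  | [], _ => []
  | row :: rest, ind =>
    (if row.length ≠ 0 ∧ lado_a = PySem.List.pyGetD row 0 0 then [ind] else []) ++
      find_indexs_go lado_a rest (ind + 1)

def find_indexs (lado_a : Int) (mesa : List (List Int)) : List Int :=
  find_indexs_go lado_a mesa 0

def joga_pedra (pedra : List Int) (mesa : List (List Int)) (index : Int) : List (List Int) :=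
  let valores_anteriores := PySem.List.slice mesa none (some index)
  let valores_posteriores :=
    if (mesa.length : Int) ≠ index + 1 then PySem.List.slice mesa (some (index + 1)) none
    else []
  valores_anteriores ++ [ponta_que_entra pedra (PySem.List.pyGetD mesa index [])] ++ valores_posteriores

def m_mais_ponto (pedra : List Int) (mesa : List (List Int)) : Int × Int :=
  let indexs := find_indexs (PySem.List.pyGetD pedra 0 0) mesa ++ find_indexs (PySem.List.pyGetD pedra 1 0) mesa
  indexs.foldl (fun st inx =>
    if st.1 ≤ sum_pontas (joga_pedra pedra mesa inx) then
      (sum_pontas (joga_pedra pedra mesa inx), inx)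
    else st) (0, 0)

-- ===== PORT B =====
-- Follows Source B: one pass building (total, row_sums), then for each side a
-- guarded pass over enumerate(mesa) scoring val = total - row_sums[i] + new.
def m_mais_ponto_alt (pedra : List Int) (mesa : List (List Int)) : Int × Int :=
  let a := PySem.List.pyGetD pedra 0 0
  let b := PySem.List.pyGetD pedra 1 0
  let tr := mesa.foldl (fun (acc : Int × List Int) row => (acc.1 + row.sum, acc.2 ++ [row.sum])) (0, [])
  [a, b].foldl (fun st side =>
    (PySem.List.enumerate mesa 0).foldl (fun st p =>
      match p.2 with
      | [] => st
      | x :: _ =>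
        if x = side then
          let nw := if x = a then (if a ≠ b then b else a + b) else a
          -- row_sums[i]: i is a valid index of row_sums on every reached element
          let val := tr.1 - PySem.List.pyGetD tr.2 p.1 0 + nw
          if st.1 ≤ val then (val, p.1) else st
        else st) st) ((0 : Int), (0 : Int))

-- ===== PRECONDITION & SPEC =====
-- Python A evaluates pedra[0] and pedra[1] unconditionally and raises IndexError
-- when len(pedra) < 2; those inputs are excluded, nothing else is.
def Pre_m_mais_ponto (pedra : List Int) (mesa : List (List Int)) : Prop :=
  2 ≤ pedra.length
instance (pedra : List Int) (mesa : List (List Int)) : Decidable (Pre_m_mais_ponto pedra mesa) := by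
  unfold Pre_m_mais_ponto; infer_instance

def pvWitness_m_mais_ponto : List Int × List (List Int) := ([1, 2], [[1, 3], [4]])

def Spec_m_mais_ponto (pedra : List Int) (mesa : List (List Int)) (out : Int × Int) : Prop := out = m_mais_ponto_alt pedra mesa
instance (pedra : List Int) (mesa : List (List Int)) (out : Int × Int) : Decidable (Spec_m_mais_ponto pedra mesa out) := by unfold Spec_m_mais_ponto; infer_instance

-- ===== CLAIM (what is proved, stated in full; the proofs are below) =====
def Claim_equal_m_mais_ponto : Prop := ∀ (pedra : List Int) (mesa : List (List Int)), Dom_m_mais_ponto pedra mesa → Pre_m_mais_ponto pedra mesa → Spec_m_mais_ponto pedra mesa (m_mais_ponto pedra mesa)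

-- ===== LEMMAS AND PROOFS =====

-- B's step on one candidate index, as the proofs name it (exactly the body of the
-- guarded branch of B's inner loop).
def bstep (a b T : Int) (RS : List Int) (side : Int) (st : Int × Int) (i : Int) : Int × Int :=
  let nw := if side = a then (if a ≠ b then b else a + b) else a
  let val := T - PySem.List.pyGetD RS i 0 + nw
  if st.1 ≤ val then (val, i) else st

theorem suma_eq_sum (l : List Int) : suma l = l.sum := by
  induction l with
  | nil => rfl
  | cons x xs ih => simp [suma, ih]

theorem sum_pontas_eq (m : List (List Int)) : sum_pontas m = (m.map List.sum).sum := by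
  induction m with
  | nil => rfl
  | cons p ps ih => simp [sum_pontas, ih, suma_eq_sum]

-- B's first loop: the accumulated pair is (total so far, row sums so far).
theorem rowsums_foldl (m : List (List Int)) : ∀ (t : Int) (rs : List Int),
    m.foldl (fun (acc : Int × List Int) row => (acc.1 + row.sum, acc.2 ++ [row.sum])) (t, rs)
      = (t + (m.map List.sum).sum, rs ++ m.map List.sum) := by
  induction m with
  | nil => simp
  | cons r m ih => intro t rs; simp [ih, add_assoc]

-- Replacing row k and re-summing the table is total − sum(row k) + sum(new row).
theorem joga_sum (pedra : List Int) (mesa : List (List Int)) (k : Nat) (hk : k < mesa.length) :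
    sum_pontas (joga_pedra pedra mesa (k : Int))
      = (mesa.map List.sum).sum - (mesa[k]).sum + (ponta_que_entra pedra mesa[k]).sum := by
  have hmesa : mesa = mesa.take k ++ mesa[k] :: mesa.drop (k + 1) := by
    conv_lhs => rw [← List.take_append_drop k mesa]
    rw [List.drop_eq_getElem_cons hk]
  have h2 : PySem.List.pyGetD mesa (k : Int) [] = mesa[k] := by
    rw [PySem.List.pyGetD_natCast]; exact List.getD_eq_getElem mesa [] hk
  have hjp : joga_pedra pedra mesa (k : Int)
      = mesa.take k ++ [ponta_que_entra pedra mesa[k]] ++ mesa.drop (k + 1) := by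
    unfold joga_pedra
    rw [h2, PySem.List.slice_to_natCast mesa k]
    by_cases hlast : (mesa.length : Int) = (k : Int) + 1
    · rw [if_neg (by simpa using hlast)]
      rw [List.drop_eq_nil_of_le (by omega)]
    · rw [if_pos hlast]
      rw [show ((k : Int) + 1) = ((k + 1 : Nat) : Int) from by push_cast; ring,
        PySem.List.slice_from_natCast mesa (k + 1)]
  have hsum : (mesa.map List.sum).sum
      = ((mesa.take k).map List.sum).sum + (mesa[k]).sum + ((mesa.drop (k + 1)).map List.sum).sum := by
    conv_lhs => rw [hmesa]
    rw [List.map_append, List.sum_append, List.map_cons, List.sum_cons]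
    ring
  rw [hjp, sum_pontas_eq, hsum]
  simp
  ring

-- Every index produced by find_indexs_go: its position, a nonempty row, head match.
theorem mem_find_go (s : Int) : ∀ (mesa : List (List Int)) (n i : Int),
    i ∈ find_indexs_go s mesa n →
    ∃ k : Nat, i = n + k ∧ ∃ hk : k < mesa.length, mesa[k] ≠ [] ∧ s = PySem.List.pyGetD mesa[k] 0 0 := by
  intro mesa
  induction mesa with
  | nil => intro n i h; simp [find_indexs_go] at h
  | cons row rest ih =>
    intro n i h
    simp only [find_indexs_go, List.mem_append] at h
    rcases h with h | h
    · split at h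
      · rename_i hcond
        simp at h; subst h
        exact ⟨0, by simp, by simpa using ⟨by simpa [List.length_eq_zero_iff] using hcond.1, hcond.2⟩⟩
      · simp at h
    · obtain ⟨k, hik, hk, hne, hs⟩ := ih (n + 1) i h
      exact ⟨k + 1, by push_cast; omega, by simpa using hk, by simpa using hne, by simpa using hs⟩

-- B's guarded pass over enumerate(mesa) performs exactly one bstep per index of
-- find_indexs_go side mesa, in the same order.
theorem enum_fold_eq (a b side T : Int) (RS : List Int) :
    ∀ (mesa : List (List Int)) (n : Int) (st : Int × Int),
    (PySem.List.enumerate mesa n).foldl (fun st p =>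
      match p.2 with
      | [] => st
      | x :: _ =>
        if x = side then
          let nw := if x = a then (if a ≠ b then b else a + b) else a
          let val := T - PySem.List.pyGetD RS p.1 0 + nw
          if st.1 ≤ val then (val, p.1) else st
        else st) st
    = (find_indexs_go side mesa n).foldl (bstep a b T RS side) st := by
  intro mesa
  induction mesa with
  | nil => intro n st; simp [find_indexs_go, PySem.List.enumerate_nil]
  | cons row rest ih =>
    intro n st
    rw [PySem.List.enumerate_cons, List.foldl_cons]
    cases row with
    | nil =>
      rw [ih, show find_indexs_go side ([] :: rest) n = find_indexs_go side rest (n + 1) from by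
        simp [find_indexs_go]]
    | cons x xs =>
      by_cases hx : x = side
      · rw [ih, show find_indexs_go side ((x :: xs) :: rest) n
              = n :: find_indexs_go side rest (n + 1) from by
            simp [find_indexs_go, PySem.List.pyGetD_zero_cons, hx], List.foldl_cons]
        congr 1
        simp [bstep, hx]
      · rw [ih, show find_indexs_go side ((x :: xs) :: rest) n = find_indexs_go side rest (n + 1) from by
          simp [find_indexs_go, PySem.List.pyGetD_zero_cons]
          exact fun h => hx h.symm]
        congr 1
        simp [hx]

-- On every index find_indexs produces, A's step (re-sum the rebuilt table) equals
-- B's bstep (delta on the precomputed sums).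
theorem step_agree (pedra : List Int) (mesa : List (List Int)) (side : Int) :
    ∀ i ∈ find_indexs_go side mesa 0, ∀ st : Int × Int,
      (if st.1 ≤ sum_pontas (joga_pedra pedra mesa i) then (sum_pontas (joga_pedra pedra mesa i), i) else st)
      = bstep (PySem.List.pyGetD pedra 0 0) (PySem.List.pyGetD pedra 1 0)
          ((mesa.map List.sum).sum) (mesa.map List.sum) side st i := by
  intro i hi st
  obtain ⟨k, hik, hk, hne, hs⟩ := mem_find_go side mesa 0 i hi
  have hik' : i = (k : Int) := by omega
  subst hik'
  have hrs : PySem.List.pyGetD (mesa.map List.sum) (k : Int) 0 = (mesa[k]).sum := by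
    rw [PySem.List.pyGetD_natCast]
    rw [List.getD_eq_getElem _ 0 (by simpa using hk)]
    simp
  have hval : sum_pontas (joga_pedra pedra mesa (k : Int))
      = (mesa.map List.sum).sum - (mesa[k]).sum
        + (if side = PySem.List.pyGetD pedra 0 0 then
            (if PySem.List.pyGetD pedra 0 0 ≠ PySem.List.pyGetD pedra 1 0 then PySem.List.pyGetD pedra 1 0
             else PySem.List.pyGetD pedra 0 0 + PySem.List.pyGetD pedra 1 0)
           else PySem.List.pyGetD pedra 0 0) := by
    rw [joga_sum pedra mesa k hk]
    congr 1
    unfold ponta_que_entra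
    rw [← hs]
    by_cases h1 : PySem.List.pyGetD pedra 0 0 = side
    · by_cases h2 : PySem.List.pyGetD pedra 0 0 = PySem.List.pyGetD pedra 1 0
      · have h3 : side = PySem.List.pyGetD pedra 1 0 := by rw [← h1]; exact h2
        simp [h1, h3]
      · have h3 : ¬ side = PySem.List.pyGetD pedra 1 0 := by rw [← h1]; exact h2
        simp [h1, h3]
    · have h1' : side ≠ PySem.List.pyGetD pedra 0 0 := fun h => h1 h.symm
      simp [h1, h1']
  rw [hval]
  simp only [bstep, hrs]

-- ===== VERDICT (by name: the statement is the Claim_ definition above) =====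
theorem m_mais_ponto_spec : Claim_equal_m_mais_ponto := by
  intro pedra mesa _ _
  unfold Spec_m_mais_ponto m_mais_ponto m_mais_ponto_alt find_indexs
  rw [rowsums_foldl mesa 0 []]
  simp only [List.foldl_cons, List.foldl_nil, zero_add, List.nil_append, List.foldl_append]
  rw [enum_fold_eq (PySem.List.pyGetD pedra 0 0) (PySem.List.pyGetD pedra 1 0)
      (PySem.List.pyGetD pedra 0 0) ((mesa.map List.sum).sum) (mesa.map List.sum) mesa 0,
    enum_fold_eq (PySem.List.pyGetD pedra 0 0) (PySem.List.pyGetD pedra 1 0)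
      (PySem.List.pyGetD pedra 1 0) ((mesa.map List.sum).sum) (mesa.map List.sum) mesa 0]
  have hA := PySem.List.foldl_congr_mem' (find_indexs_go (PySem.List.pyGetD pedra 0 0) mesa 0)
    _ _ ((0 : Int), (0 : Int)) (step_agree pedra mesa (PySem.List.pyGetD pedra 0 0))
  rw [hA]
  exact PySem.List.foldl_congr_mem' _ _ _ _ (step_agree pedra mesa (PySem.List.pyGetD pedra 1 0))
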